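-- pv_equiv track=rewrite | github.com/guoweifk/Chronos | control_center/autoAnalysis/get_min_graph.py | one_hop_subgraph
-- ===== SOURCE A (Python) =====
-- from typing import Dict, Set, Iterable, Tuple
--
-- Graph = Dict[str, Set[str]]
--
-- def build_undirected(g: Graph) -> Graph:
--     """把上面的有向/半向图转成无向图，方便做最短路径。"""
--     ug: Graph = {n: set() for n in g}
--     for u, nbrs in g.items():
--         for v in nbrs:
--             ug.setdefault(u, set()).add(v)
--             ug.setdefault(v, set()).add(u)
--     return ug
--
-- def one_hop_subgraph(
--     full_graph: Graph,
--     center: str,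
-- ) -> Tuple[Set[str], Set[Tuple[str, str]]]:
--     """
--     给定一个中心节点 center，返回其一跳邻居子图：
--       - sub_nodes: center 本身 + 所有直接相连的节点
--       - sub_edges: center 与这些邻居之间的无向边 (u, v)（u < v）
--     """
--     ug = build_undirected(full_graph)
--
--     if center not in ug:
--         return set(), set()
--
--     neighbors = ug[center]
--     sub_nodes: Set[str] = {center} | set(neighbors)
--     sub_edges: Set[Tuple[str, str]] = set()
--
--     for n in neighbors:
--         edge = tuple(sorted((center, n)))
--         sub_edges.add(edge)
--
--     return sub_nodes, sub_edges
-- ===== SOURCE B (Python) =====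
-- def one_hop_subgraph(full_graph, center):
--     # Single pass over the graph: collect center's outgoing and incoming
--     # neighbors directly, without building the full undirected graph.
--     neighbors = set()
--     found = center in full_graph
--     for u, nbrs in full_graph.items():
--         if u == center:
--             neighbors |= nbrs
--         if center in nbrs:
--             neighbors.add(u)
--             found = True
--     if not found:
--         return set(), set()
--     sub_nodes = {center} | neighbors
--     sub_edges = {tuple(sorted((center, n))) for n in neighbors}
--     return sub_nodes, sub_edges
-- ===== Notes on version B (the rewrite author's own statement) =====
-- stated objective: simpler
-- what changed: B drops build_undirected's full undirected adjacency dict (nested loops inserting every edge in both directions for all nodes) and instead collects center's neighbors in a single pass over the items, tracking a found flag for the membership guard.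
import Mathlib
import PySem

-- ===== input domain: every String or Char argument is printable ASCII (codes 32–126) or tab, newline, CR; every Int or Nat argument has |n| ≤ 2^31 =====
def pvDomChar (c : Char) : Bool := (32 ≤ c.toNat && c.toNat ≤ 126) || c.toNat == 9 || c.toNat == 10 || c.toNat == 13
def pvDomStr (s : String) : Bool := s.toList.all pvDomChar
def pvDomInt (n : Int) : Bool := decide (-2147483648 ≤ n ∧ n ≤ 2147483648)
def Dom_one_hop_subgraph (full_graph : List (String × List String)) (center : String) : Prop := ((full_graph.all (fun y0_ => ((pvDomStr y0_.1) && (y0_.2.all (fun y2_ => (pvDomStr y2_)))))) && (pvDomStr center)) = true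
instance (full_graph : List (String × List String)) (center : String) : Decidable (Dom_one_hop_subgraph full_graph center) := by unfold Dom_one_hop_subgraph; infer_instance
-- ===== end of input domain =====

-- B replaces A's full undirected-graph construction (a dict of sets over every node)
-- by a single pass over the adjacency dict that collects only center's neighbors; objective: simpler.
-- Return sets are compared as finite sets; the ports fix the PySem insertion order.

-- ===== PORT A =====
def build_undirected (g : PySem.Dict String (PySem.Set String)) : PySem.Dict String (PySem.Set String) :=
  let ug : PySem.Dict String (PySem.Set String) :=
    PySem.Dict.mk (g.keys.map (fun n => (n, PySem.Set.empty)))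
  g.items.foldl (fun ug p =>
    p.2.foldl (fun ug v =>
      ((ug.modify p.1 PySem.Set.empty (fun s => PySem.Set.add s v)).modify v PySem.Set.empty
        (fun s => PySem.Set.add s p.1))) ug) ug

def one_hop_subgraph (full_graph : List (String × List String)) (center : String) :
    List String × (List (String × String)) :=
  let g : PySem.Dict String (PySem.Set String) :=
    PySem.Dict.ofList (full_graph.map (fun p => (p.1, PySem.Set.ofList p.2)))
  let ug := build_undirected g
  if ug.contains center then
    let neighbors := ug.getD center PySem.Set.empty
    let sub_nodes := PySem.Set.union (PySem.Set.ofList [center]) neighbors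
    let sub_edges := neighbors.foldl
      (fun es n => PySem.Set.add es (if n < center then (n, center) else (center, n)))
      PySem.Set.empty
    (sub_nodes, sub_edges)
  else ([], [])

-- ===== PORT B =====
def one_hop_subgraph_alt (full_graph : List (String × List String)) (center : String) :
    List String × (List (String × String)) :=
  let g : PySem.Dict String (PySem.Set String) :=
    PySem.Dict.ofList (full_graph.map (fun p => (p.1, PySem.Set.ofList p.2)))
  let acc := g.items.foldl (fun acc p =>
    let ns := if p.1 == center then PySem.Set.update acc.1 p.2 else acc.1
    if p.2.contains center then (PySem.Set.add ns p.1, true) else (ns, acc.2))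
    ((PySem.Set.empty : PySem.Set String), g.contains center)
  if acc.2 then
    (PySem.Set.union (PySem.Set.ofList [center]) acc.1,
     PySem.Set.ofList (acc.1.map (fun n => if n < center then (n, center) else (center, n))))
  else ([], [])

-- ===== PRECONDITION & SPEC =====
def Spec_one_hop_subgraph (full_graph : List (String × List String)) (center : String) (out : List String × (List (String × String))) : Prop := out = one_hop_subgraph_alt full_graph center
instance (full_graph : List (String × List String)) (center : String) (out : List String × (List (String × String))) : Decidable (Spec_one_hop_subgraph full_graph center out) := by unfold Spec_one_hop_subgraph; infer_instance

-- ===== CLAIM (what is proved, stated in full; the proofs are below) =====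
def Claim_equal_one_hop_subgraph : Prop := ∀ (full_graph : List (String × List String)) (center : String), Dom_one_hop_subgraph full_graph center → Spec_one_hop_subgraph full_graph center (one_hop_subgraph full_graph center)

-- ===== LEMMAS AND PROOFS =====

theorem innerA_getD (c u : String) (nbrs : List String)
    (d : PySem.Dict String (PySem.Set String)) :
    ((nbrs.foldl (fun d v =>
        ((d.modify u PySem.Set.empty (fun s => PySem.Set.add s v)).modify v PySem.Set.empty
          (fun s => PySem.Set.add s u))) d).getD c PySem.Set.empty)
    = if u = c then PySem.Set.update (d.getD c PySem.Set.empty) nbrs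
      else if nbrs.contains c then PySem.Set.add (d.getD c PySem.Set.empty) u
      else d.getD c PySem.Set.empty := by
  induction nbrs generalizing d with
  | nil => split <;> rfl
  | cons v rest ih =>
    rw [List.foldl_cons, ih]
    by_cases huc : u = c
    · subst huc
      by_cases hvc : v = u
      · subst hvc
        simp [PySem.Set.update_cons]
      · simp [PySem.Dict.getD_modify, Ne.symm hvc, PySem.Set.update_cons]
    · by_cases hvc : v = c
      · subst hvc
        simp [PySem.Dict.getD_modify, huc, Ne.symm huc]
      · simp [PySem.Dict.getD_modify, huc, Ne.symm huc, Ne.symm hvc]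

theorem innerA_contains (c u : String) (nbrs : List String)
    (d : PySem.Dict String (PySem.Set String)) :
    ((nbrs.foldl (fun d v =>
        ((d.modify u PySem.Set.empty (fun s => PySem.Set.add s v)).modify v PySem.Set.empty
          (fun s => PySem.Set.add s u))) d).contains c)
    = (d.contains c || nbrs.any (fun v => u == c || v == c)) := by
  induction nbrs generalizing d with
  | nil => simp
  | cons v rest ih =>
    rw [List.foldl_cons, ih]
    simp only [PySem.Dict.contains_modify, List.any_cons]
    by_cases huc : u = c
    · simp [huc, Bool.or_comm]
    · by_cases hvc : v = c
      · simp [hvc, Bool.or_comm]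
      · simp [beq_eq_false_iff_ne.mpr huc, beq_eq_false_iff_ne.mpr hvc,
              beq_eq_false_iff_ne.mpr (Ne.symm huc), beq_eq_false_iff_ne.mpr (Ne.symm hvc)]

theorem foldAB (c : String) (l : List (String × PySem.Set String))
    (d : PySem.Dict String (PySem.Set String)) (s : PySem.Set String) (b : Bool)
    (h1 : d.getD c PySem.Set.empty = s) (h2 : d.contains c = b)
    (hG : ∀ p ∈ l, p.1 = c → b = true) :
    ((l.foldl (fun ug p =>
        p.2.foldl (fun ug v =>
          ((ug.modify p.1 PySem.Set.empty (fun s => PySem.Set.add s v)).modify v PySem.Set.empty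
            (fun s => PySem.Set.add s p.1))) ug) d).getD c PySem.Set.empty
      = (l.foldl (fun acc p =>
          let ns := if p.1 == c then PySem.Set.update acc.1 p.2 else acc.1
          if p.2.contains c then (PySem.Set.add ns p.1, true) else (ns, acc.2)) (s, b)).1)
    ∧ ((l.foldl (fun ug p =>
        p.2.foldl (fun ug v =>
          ((ug.modify p.1 PySem.Set.empty (fun s => PySem.Set.add s v)).modify v PySem.Set.empty
            (fun s => PySem.Set.add s p.1))) ug) d).contains c
      = (l.foldl (fun acc p =>
          let ns := if p.1 == c then PySem.Set.update acc.1 p.2 else acc.1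
          if p.2.contains c then (PySem.Set.add ns p.1, true) else (ns, acc.2)) (s, b)).2) := by
  induction l generalizing d s b with
  | nil => exact ⟨h1, h2⟩
  | cons p rest ih =>
    obtain ⟨u, nbrs⟩ := p
    rw [List.foldl_cons, List.foldl_cons]
    have hg := innerA_getD c u nbrs d
    have hc := innerA_contains c u nbrs d
    by_cases huc : u = c
    · subst huc
      have hb : b = true := hG (u, nbrs) (by simp) rfl
      subst hb
      by_cases hcn : nbrs.contains u
      · have hm : u ∈ nbrs := by simpa using hcn
        simp only [beq_self_eq_true, if_true, hcn]
        refine ih _ _ _ ?_ ?_ ?_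
        · rw [hg, h1]; simp
          exact (PySem.Set.add_of_mem ((PySem.Set.mem_update _ _ _).mpr (Or.inr hm))).symm
        · rw [hc, h2]; simp
        · exact fun q hq hq1 => rfl
      · simp only [beq_self_eq_true, if_true, hcn, Bool.false_eq_true, if_false]
        refine ih _ _ _ ?_ ?_ ?_
        · rw [hg, h1]; simp
        · rw [hc, h2]; simp
        · exact fun q hq hq1 => rfl
    · have hne : (u == c) = false := beq_eq_false_iff_ne.mpr huc
      by_cases hcn : nbrs.contains c
      · have hm : c ∈ nbrs := by simpa using hcn
        simp only [hne, Bool.false_eq_true, if_false, hcn, if_true]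
        refine ih _ _ _ ?_ ?_ ?_
        · rw [hg, h1]; simp [huc, hm]
        · rw [hc, h2]; simp [List.any_eq_true]
          exact Or.inr ⟨c, hm, Or.inr rfl⟩
        · exact fun q hq hq1 => rfl
      · have hm : c ∉ nbrs := by simpa using hcn
        simp only [hne, Bool.false_eq_true, if_false, hcn]
        refine ih _ _ _ ?_ ?_ ?_
        · rw [hg, h1]; simp [huc, hm]
        · rw [hc, h2]; simp [List.any_eq_true, huc, hm]
        · exact fun q hq hq1 => hG q (by simp [hq]) hq1

theorem mk_empty_getD (ks : List String) (c : String) :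
    ((PySem.Dict.mk (ks.map (fun n => (n, (PySem.Set.empty : PySem.Set String))))).getD c PySem.Set.empty) = PySem.Set.empty := by
  induction ks with
  | nil => rfl
  | cons k rest ih =>
    simp only [PySem.Dict.getD_eq_get?_getD, List.map_cons, PySem.Dict.get?_mk_cons] at ih ⊢
    split
    · rfl
    · exact ih

theorem mk_empty_contains (g : PySem.Dict String (PySem.Set String)) (c : String) :
    ((PySem.Dict.mk (g.keys.map (fun n => (n, (PySem.Set.empty : PySem.Set String))))).contains c) = g.contains c := by
  rw [PySem.Dict.contains_eq_decide_mem_keys, PySem.Dict.contains_eq_decide_mem_keys]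
  simp

theorem edges_eq (c : String) (ns : List String) :
    ns.foldl (fun es n => PySem.Set.add es (if n < c then (n, c) else (c, n))) PySem.Set.empty
    = PySem.Set.ofList (ns.map (fun n => if n < c then (n, c) else (c, n))) := by
  rw [← PySem.Set.update_map_eq_foldl_add]; rfl

-- ===== VERDICT (by name: the statement is the Claim_ definition above) =====
theorem one_hop_subgraph_spec : Claim_equal_one_hop_subgraph := by
  intro fg c _
  unfold Spec_one_hop_subgraph one_hop_subgraph one_hop_subgraph_alt build_undirected
  have hG : ∀ p ∈ (PySem.Dict.ofList (fg.map (fun p => (p.1, PySem.Set.ofList p.2)))).items,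
      p.1 = c → (PySem.Dict.ofList (fg.map (fun p => (p.1, PySem.Set.ofList p.2)))).contains c = true := by
    intro p hp h1
    exact (PySem.Dict.contains_iff_mem_keys _ _).mpr (h1 ▸ PySem.Dict.mem_keys_of_mem_items _ hp)
  obtain ⟨hA1, hA2⟩ := foldAB c (PySem.Dict.ofList (fg.map (fun p => (p.1, PySem.Set.ofList p.2)))).items
    (PySem.Dict.mk ((PySem.Dict.ofList (fg.map (fun p => (p.1, PySem.Set.ofList p.2)))).keys.map (fun n => (n, PySem.Set.empty))))
    PySem.Set.empty ((PySem.Dict.ofList (fg.map (fun p => (p.1, PySem.Set.ofList p.2)))).contains c)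
    (mk_empty_getD _ c) (mk_empty_contains _ c) hG
  simp only [hA1, hA2, edges_eq]
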